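-- pv_equiv track=rewrite | github.com/asdkfnjkhzxoiuiou34341/erio-0vzcv319423fs | moonsec_decoder.py | extract_probable_lua_code
-- ===== SOURCE A (Python) =====
-- def extract_probable_lua_code(text):
--     """Извлекает вероятный Lua код"""
--     # Ищем участки, которые могут быть кодом
--     # Начинаем с поиска структур типа функций
--
--     # Попробуем найти паттерны, характерные для Lua
--     lua_keywords = ['function', 'local', 'end', 'if', 'then', 'else', 'for', 'while', 'do', 'return']
--
--     # Заменим наиболее частые символы на возможные Lua символы
--     freq_to_lua = {
--         '!': 'e',  # Самый частый символ в английском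
--         '#': 'a',
--         '%': 't',
--         '&': 'o',
--         'S': 'n',
--         'z': 'r',
--         'g': 'i',
--         'm': 's',
--         '6': 'l',
--         '7': 'h'
--     }
--
--     # Применяем замены
--     decoded_attempt = text
--     for old, new in freq_to_lua.items():
--         decoded_attempt = decoded_attempt.replace(old, new)
--
--     return decoded_attempt
-- ===== SOURCE B (Python) =====
-- def extract_probable_lua_code(text):
--     """Извлекает вероятный Lua код"""
--     lua_keywords = ['function', 'local', 'end', 'if', 'then', 'else', 'for', 'while', 'do', 'return']
--     freq_to_lua = {
--         '!': 'e',
--         '#': 'a',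
--         '%': 't',
--         '&': 'o',
--         'S': 'n',
--         'z': 'r',
--         'g': 'i',
--         'm': 's',
--         '6': 'l',
--         '7': 'h'
--     }
--     # single pass: map each character through the table (keys and values are disjoint,
--     # so this equals the sequential replaces)
--     return ''.join(freq_to_lua.get(c, c) for c in text)
-- ===== Notes on version B (the rewrite author's own statement) =====
-- stated objective: idiomatic
-- what changed: Replaced the loop of ten sequential full-string str.replace passes with a single pass that maps each character through the substitution dict (valid since replacement values are disjoint from keys).
import Mathlib
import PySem

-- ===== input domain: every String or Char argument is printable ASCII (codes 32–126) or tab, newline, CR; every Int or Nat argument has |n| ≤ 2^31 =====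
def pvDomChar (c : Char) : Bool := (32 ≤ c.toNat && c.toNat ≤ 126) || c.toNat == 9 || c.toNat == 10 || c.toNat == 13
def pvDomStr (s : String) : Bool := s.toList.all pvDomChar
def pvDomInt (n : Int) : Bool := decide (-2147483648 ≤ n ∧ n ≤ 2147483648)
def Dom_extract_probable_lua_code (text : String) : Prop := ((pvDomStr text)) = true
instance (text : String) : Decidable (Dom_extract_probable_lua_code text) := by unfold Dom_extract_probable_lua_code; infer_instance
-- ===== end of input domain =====

-- B replaces A's ten sequential full-string replace passes with one pass mapping each
-- character through the substitution table (values are disjoint from keys, so the results agree).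

-- ===== PORT A =====
-- freq_to_lua.items() as an association list in insertion order; the loop of
-- str.replace calls is a foldl of PySem.Str.replace over it.
def pvFreqToLuaItems : List (String × String) :=
  [("!", "e"), ("#", "a"), ("%", "t"), ("&", "o"), ("S", "n"),
   ("z", "r"), ("g", "i"), ("m", "s"), ("6", "l"), ("7", "h")]

def extract_probable_lua_code (text : String) : String :=
  pvFreqToLuaItems.foldl (fun acc p => PySem.Str.replace acc p.1 p.2) text

-- ===== PORT B =====
-- the dict literal freq_to_lua; its keys/values are single-char strings, modelled on Char.
-- The literal's keys are distinct, so its items list is exactly the written pair list (Dict.mk).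
def pvFreqToLua : PySem.Dict Char Char :=
  PySem.Dict.mk
    [('!', 'e'), ('#', 'a'), ('%', 't'), ('&', 'o'), ('S', 'n'),
     ('z', 'r'), ('g', 'i'), ('m', 's'), ('6', 'l'), ('7', 'h')]

-- ''.join(freq_to_lua.get(c, c) for c in text)
def extract_probable_lua_code_alt (text : String) : String :=
  String.ofList (text.toList.map (fun c => pvFreqToLua.getD c c))

-- ===== PRECONDITION & SPEC =====
def Spec_extract_probable_lua_code (text : String) (out : String) : Prop := out = extract_probable_lua_code_alt text
instance (text : String) (out : String) : Decidable (Spec_extract_probable_lua_code text out) := by unfold Spec_extract_probable_lua_code; infer_instance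

-- ===== CLAIM (what is proved, stated in full; the proofs are below) =====
def Claim_equal_extract_probable_lua_code : Prop := ∀ (text : String), Dom_extract_probable_lua_code text → Spec_extract_probable_lua_code text (extract_probable_lua_code text)

-- ===== LEMMAS AND PROOFS =====

-- replace.go with a single-char pattern is a character map
theorem pv_go_single (o n : Char) : ∀ (l : List Char) (fuel : Nat) (acc : List Char), l.length ≤ fuel →
    PySem.Chars.replace.go [o] [n] fuel l acc = acc.reverse ++ l.map (fun c => if c == o then n else c) := by
  intro l
  induction l with
  | nil =>
    intro fuel acc h
    cases fuel <;> simp [PySem.Chars.replace.go]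
  | cons c t ih =>
    intro fuel acc h
    cases fuel with
    | zero => simp at h
    | succ f =>
      rw [PySem.Chars.replace.go]
      by_cases hc : o = c
      · subst hc
        simp [List.isPrefixOf, ih f _ (by simpa using h)]
      · have hp : [o].isPrefixOf (c :: t) = false := by
          simp [List.isPrefixOf]; exact hc
        simp [hp, ih f _ (by simpa using h), Ne.symm hc]

-- str.replace with single-char old/new is a character map
theorem pv_replace_single (s : List Char) (o n : Char) :
    PySem.Chars.replace s [o] [n] = s.map (fun c => if c == o then n else c) := by
  rw [PySem.Chars.replace]
  simp [pv_go_single o n s s.length [] le_rfl]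

-- the ten successive character maps collapse to the single table lookup
theorem pv_maps (l : List Char) :
    List.map (fun c => if c == '7' then 'h' else c) (List.map (fun c => if c == '6' then 'l' else c)
    (List.map (fun c => if c == 'm' then 's' else c) (List.map (fun c => if c == 'g' then 'i' else c)
    (List.map (fun c => if c == 'z' then 'r' else c) (List.map (fun c => if c == 'S' then 'n' else c)
    (List.map (fun c => if c == '&' then 'o' else c) (List.map (fun c => if c == '%' then 't' else c)
    (List.map (fun c => if c == '#' then 'a' else c) (List.map (fun c => if c == '!' then 'e' else c) l))))))))) =
    List.map (fun c => pvFreqToLua.getD c c) l := by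
  simp only [List.map_map]
  refine List.map_congr_left ?_
  intro c _
  by_cases h1 : c = '!'; · subst h1; decide
  by_cases h2 : c = '#'; · subst h2; decide
  by_cases h3 : c = '%'; · subst h3; decide
  by_cases h4 : c = '&'; · subst h4; decide
  by_cases h5 : c = 'S'; · subst h5; decide
  by_cases h6 : c = 'z'; · subst h6; decide
  by_cases h7 : c = 'g'; · subst h7; decide
  by_cases h8 : c = 'm'; · subst h8; decide
  by_cases h9 : c = '6'; · subst h9; decide
  by_cases h10 : c = '7'; · subst h10; decide
  have g1 : ('!' : Char) ≠ c := fun h => h1 h.symm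
  have g2 : ('#' : Char) ≠ c := fun h => h2 h.symm
  have g3 : ('%' : Char) ≠ c := fun h => h3 h.symm
  have g4 : ('&' : Char) ≠ c := fun h => h4 h.symm
  have g5 : ('S' : Char) ≠ c := fun h => h5 h.symm
  have g6 : ('z' : Char) ≠ c := fun h => h6 h.symm
  have g7 : ('g' : Char) ≠ c := fun h => h7 h.symm
  have g8 : ('m' : Char) ≠ c := fun h => h8 h.symm
  have g9 : ('6' : Char) ≠ c := fun h => h9 h.symm
  have g10 : ('7' : Char) ≠ c := fun h => h10 h.symm
  simp only [pvFreqToLua, PySem.Dict.getD, PySem.Dict.get?]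
  simp [h1, h2, h3, h4, h5, h6, h7, h8, h9, h10, g1, g2, g3, g4, g5, g6, g7, g8, g9, g10]

-- ===== VERDICT (by name: the statement is the Claim_ definition above) =====
theorem extract_probable_lua_code_spec : Claim_equal_extract_probable_lua_code := by
  intro text _
  unfold Spec_extract_probable_lua_code extract_probable_lua_code extract_probable_lua_code_alt pvFreqToLuaItems
  simp only [List.foldl_cons, List.foldl_nil]
  simp only [PySem.Str.replace, String.toList_ofList]
  have e1 : ("!" : String).toList = ['!'] := by decide
  have e2 : ("e" : String).toList = ['e'] := by decide
  have e3 : ("#" : String).toList = ['#'] := by decide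
  have e4 : ("a" : String).toList = ['a'] := by decide
  have e5 : ("%" : String).toList = ['%'] := by decide
  have e6 : ("t" : String).toList = ['t'] := by decide
  have e7 : ("&" : String).toList = ['&'] := by decide
  have e8 : ("o" : String).toList = ['o'] := by decide
  have e9 : ("S" : String).toList = ['S'] := by decide
  have e10 : ("n" : String).toList = ['n'] := by decide
  have e11 : ("z" : String).toList = ['z'] := by decide
  have e12 : ("r" : String).toList = ['r'] := by decide
  have e13 : ("g" : String).toList = ['g'] := by decide
  have e14 : ("i" : String).toList = ['i'] := by decide
  have e15 : ("m" : String).toList = ['m'] := by decide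
  have e16 : ("s" : String).toList = ['s'] := by decide
  have e17 : ("6" : String).toList = ['6'] := by decide
  have e18 : ("l" : String).toList = ['l'] := by decide
  have e19 : ("7" : String).toList = ['7'] := by decide
  have e20 : ("h" : String).toList = ['h'] := by decide
  simp only [e1, e2, e3, e4, e5, e6, e7, e8, e9, e10, e11, e12, e13, e14, e15, e16, e17, e18, e19, e20]
  simp only [pv_replace_single]
  rw [pv_maps]
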